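-- pv_equiv track=rewrite | github.com/aqeeladam20/OMEX | replace_branding.py | replace_branding
-- ===== SOURCE A (Python) =====
-- def replace_branding(text):
--     """Replace ERPNext with OMEX in text while preserving case"""
--     # Handle different case variations
--     replacements = [
--         ('ERPNext', 'OMEX'),
--         ('Erpnext', 'OMEX'),
--         ('erpnext', 'omex'),
--         ('ERPNEXT', 'OMEX')
--     ]
--
--     for old, new in replacements:
--         text = text.replace(old, new)
--
--     return text
-- ===== SOURCE B (Python) =====
-- def replace_branding(text):
--     """Replace ERPNext with OMEX in text while preserving case"""
--     mapping = {
--         'ERPNext': 'OMEX',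
--         'Erpnext': 'OMEX',
--         'erpnext': 'omex',
--         'ERPNEXT': 'OMEX',
--     }
--     out = []
--     i = 0
--     n = len(text)
--     while i < n:
--         hit = mapping.get(text[i:i + 7])
--         if hit is not None:
--             out.append(hit)
--             i += 7
--         else:
--             out.append(text[i])
--             i += 1
--     return ''.join(out)
-- ===== Notes on version B (the rewrite author's own statement) =====
-- stated objective: alternative
-- what changed: A makes four sequential whole-string replace passes (one per case variant); B builds a dict keyed by the four variants and does a single left-to-right scan, looking up each 7-character window once and joining the emitted pieces at the end.
import Mathlib
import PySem

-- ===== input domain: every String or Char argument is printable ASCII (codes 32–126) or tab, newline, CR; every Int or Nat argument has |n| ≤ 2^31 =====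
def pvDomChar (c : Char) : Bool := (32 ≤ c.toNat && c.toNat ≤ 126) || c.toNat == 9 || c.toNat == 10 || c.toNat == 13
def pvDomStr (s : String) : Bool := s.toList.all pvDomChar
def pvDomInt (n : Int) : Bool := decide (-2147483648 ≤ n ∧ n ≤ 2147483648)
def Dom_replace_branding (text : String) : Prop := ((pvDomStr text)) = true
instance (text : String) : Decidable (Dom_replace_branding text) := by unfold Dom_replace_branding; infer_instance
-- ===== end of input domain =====

-- B replaces A's four sequential whole-string replace passes by a single left-to-right
-- scan that looks each 7-char window up in a dict of the four case variants (alternative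
-- algorithm: one pass instead of four; proved to return the same string).

-- ===== PORT A =====
def replace_branding (text : String) : String :=
  let replacements : List (String × String) :=
    [("ERPNext", "OMEX"), ("Erpnext", "OMEX"), ("erpnext", "omex"), ("ERPNEXT", "OMEX")]
  replacements.foldl (fun t p => PySem.Str.replace t p.1 p.2) text

-- ===== PORT B =====
-- the dict of B, as an association list over char lists
def brandPairs : List (List Char × List Char) :=
  [(['E','R','P','N','e','x','t'], ['O','M','E','X']),
   (['E','r','p','n','e','x','t'], ['O','M','E','X']),
   (['e','r','p','n','e','x','t'], ['o','m','e','x']),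
   (['E','R','P','N','E','X','T'], ['O','M','E','X'])]

-- B's while loop: one scan; look up the 7-char window, on a hit emit the mapped
-- piece and jump 7, else copy one char ((c :: t).drop 7 = t.drop 6)
def goAlt : List Char → List Char
  | [] => []
  | c :: t =>
    match brandPairs.lookup ((c :: t).take 7) with
    | some new => new ++ goAlt (t.drop 6)
    | none => c :: goAlt t
termination_by l => l.length
decreasing_by
  · simp only [List.length_cons, List.length_drop]; omega
  · simp only [List.length_cons]; omega

def replace_branding_alt (text : String) : String := String.ofList (goAlt text.toList)

-- ===== PRECONDITION & SPEC =====
def Spec_replace_branding (text : String) (out : String) : Prop := out = replace_branding_alt text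
instance (text : String) (out : String) : Decidable (Spec_replace_branding text out) := by unfold Spec_replace_branding; infer_instance

-- ===== CLAIM (what is proved, stated in full; the proofs are below) =====
def Claim_equal_replace_branding : Prop := ∀ (text : String), Dom_replace_branding text → Spec_replace_branding text (replace_branding text)

-- ===== LEMMAS AND PROOFS =====

-- accumulator lemma for PySem.Chars.replace.go
theorem go_acc (old new : List Char) :
    ∀ (fuel : Nat) (l acc : List Char),
      PySem.Chars.replace.go old new fuel l acc =
        acc.reverse ++ PySem.Chars.replace.go old new fuel l [] := by
  intro fuel
  induction fuel with
  | zero => intro l acc; simp [PySem.Chars.replace.go]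
  | succ f ih =>
    intro l acc
    cases l with
    | nil => simp [PySem.Chars.replace.go]
    | cons c t =>
      by_cases h : old.isPrefixOf (c :: t) = true
      · simp only [PySem.Chars.replace.go, h, if_true]
        rw [ih (List.drop old.length (c :: t)) (new.reverse ++ acc)]
        simp
        rw [ih (List.drop old.length (c :: t)) new.reverse]
        simp
      · simp only [PySem.Chars.replace.go, h, if_false, Bool.false_eq_true]
        rw [ih t (c :: acc)]
        simp
        rw [ih t [c]]
        simp

theorem go_nil (old new : List Char) (fuel : Nat) :
    PySem.Chars.replace.go old new fuel [] [] = [] := by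
  cases fuel <;> simp [PySem.Chars.replace.go]

-- fuel irrelevance for go (pattern nonempty)
theorem go_fuel (old new : List Char) (hold : old ≠ []) :
    ∀ (fuel fuel' : Nat) (l : List Char), l.length ≤ fuel → l.length ≤ fuel' →
      PySem.Chars.replace.go old new fuel l [] = PySem.Chars.replace.go old new fuel' l [] := by
  intro fuel
  induction fuel with
  | zero =>
    intro fuel' l hl _
    have : l = [] := List.length_eq_zero_iff.mp (Nat.le_zero.mp hl)
    subst this
    rw [go_nil, go_nil]
  | succ f ih =>
    intro fuel' l hl hl'
    cases l with
    | nil => rw [go_nil, go_nil]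
    | cons c t =>
      cases fuel' with
      | zero => exact absurd hl' (by simp)
      | succ f' =>
        simp only [List.length_cons] at hl hl'
        have hone : 1 ≤ old.length := by
          cases old with
          | nil => exact absurd rfl hold
          | cons _ _ => simp
        by_cases h : old.isPrefixOf (c :: t) = true
        · simp only [PySem.Chars.replace.go, h, if_true]
          rw [go_acc, go_acc]
          have hd : (List.drop old.length (c :: t)).length ≤ f := by
            simp only [List.length_drop, List.length_cons]
            omega
          have hd' : (List.drop old.length (c :: t)).length ≤ f' := by
            simp only [List.length_drop, List.length_cons]
            omega
          rw [ih f' _ hd hd', go_acc old new f' _ (new.reverse ++ [])]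
          simp
        · simp only [PySem.Chars.replace.go, h, if_false, Bool.false_eq_true]
          rw [go_acc, go_acc]
          have ht : t.length ≤ f := by omega
          have ht' : t.length ≤ f' := by omega
          rw [ih f' t ht ht', go_acc old new f' t [c]]
          simp

theorem replace_nil (old new : List Char) (hold : old ≠ []) :
    PySem.Chars.replace [] old new = [] := by
  simp [PySem.Chars.replace, List.isEmpty_iff, hold, PySem.Chars.replace.go]

theorem replace_pos (old new l : List Char) (hold : old ≠ []) (h : old <+: l) :
    PySem.Chars.replace l old new = new ++ PySem.Chars.replace (l.drop old.length) old new := by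
  cases l with
  | nil =>
    exact absurd (List.prefix_nil.mp h) hold
  | cons c t =>
    have hb : old.isPrefixOf (c :: t) = true := List.isPrefixOf_iff_prefix.mpr h
    have hone : 1 ≤ old.length := by
      cases old with
      | nil => exact absurd rfl hold
      | cons _ _ => simp
    simp only [PySem.Chars.replace, List.isEmpty_iff, if_neg hold]
    simp only [List.length_cons, PySem.Chars.replace.go, hb, if_true]
    rw [go_acc]
    simp only [List.reverse_reverse, List.append_nil]
    congr 1
    apply go_fuel old new hold
    · simp only [List.length_drop, List.length_cons]; omega
    · exact le_rfl

theorem replace_neg (old new : List Char) (c : Char) (t : List Char) (h : ¬ old <+: (c :: t)) :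
    PySem.Chars.replace (c :: t) old new = c :: PySem.Chars.replace t old new := by
  have hold : old ≠ [] := by
    intro he; subst he; exact h (List.nil_prefix)
  have hb : old.isPrefixOf (c :: t) = false := by
    cases hv : old.isPrefixOf (c :: t) with
    | false => rfl
    | true => exact absurd (List.isPrefixOf_iff_prefix.mp hv) h
  simp only [PySem.Chars.replace, List.isEmpty_iff, if_neg hold]
  simp only [List.length_cons, PySem.Chars.replace.go, hb, Bool.false_eq_true, if_false]
  rw [go_acc]
  simp

theorem prefix_reflect (old new : List Char) (hold : old ≠ []) (x : Char) (nt : List Char)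
    (hnew : new = x :: nt) (p : List Char) (hp : ∀ c ∈ p, c ≠ x) :
    ∀ l, p <+: PySem.Chars.replace l old new → p <+: l := by
  suffices H : ∀ (n : Nat) (p : List Char), (∀ c ∈ p, c ≠ x) → ∀ l, l.length = n →
      p <+: PySem.Chars.replace l old new → p <+: l from
    fun l h => H l.length p hp l rfl h
  intro n
  induction n using Nat.strong_induction_on with
  | _ n ih =>
    intro p hp l hn hpre
    cases l with
    | nil =>
      rw [replace_nil old new hold] at hpre
      rw [List.prefix_nil.mp hpre]
    | cons c t =>
      by_cases hpf : old <+: (c :: t)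
      · rw [replace_pos old new _ hold hpf, hnew] at hpre
        cases p with
        | nil => exact List.nil_prefix
        | cons q p' =>
          have := (List.cons_prefix_cons.mp hpre).1
          exact absurd this (hp q (by simp))
      · rw [replace_neg old new c t hpf] at hpre
        cases p with
        | nil => exact List.nil_prefix
        | cons q p' =>
          obtain ⟨hq, hp'⟩ := List.cons_prefix_cons.mp hpre
          have ht : p' <+: t := by
            apply ih t.length (by simp [← hn]) p' (fun c hc => hp c (by simp [hc])) t rfl hp'
          exact List.cons_prefix_cons.mpr ⟨hq, ht⟩

-- copy a pattern-free literal prefix through a replace pass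
theorem pass_through (old new : List Char) (pre : List Char)
    (h : ∀ (k : Nat), k < pre.length → ∀ (xs : List Char), ¬ old <+: (pre.drop k ++ xs)) :
    ∀ xs, PySem.Chars.replace (pre ++ xs) old new = pre ++ PySem.Chars.replace xs old new := by
  induction pre with
  | nil => intro xs; simp
  | cons p ps ih =>
    intro xs
    have h0 : ¬ old <+: (p :: (ps ++ xs)) := by
      have := h 0 (by simp) xs
      simpa using this
    rw [List.cons_append, replace_neg old new p (ps ++ xs) h0]
    rw [ih (fun k hk xs => by simpa using h (k + 1) (by simpa using hk) xs) xs]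
    rfl

theorem passNW_v2 (xs : List Char) :
    PySem.Chars.replace (['O','M','E','X'] ++ xs) ['E','r','p','n','e','x','t'] ['O','M','E','X'] = ['O','M','E','X'] ++ PySem.Chars.replace xs ['E','r','p','n','e','x','t'] ['O','M','E','X'] :=
  pass_through ['E','r','p','n','e','x','t'] ['O','M','E','X'] ['O','M','E','X'] (by intro k hk xs; simp only [List.length_cons, List.length_nil] at hk; interval_cases k <;> (intro hpre; simp [List.cons_prefix_cons] at hpre)) xs

theorem passNW_v3 (xs : List Char) :
    PySem.Chars.replace (['O','M','E','X'] ++ xs) ['e','r','p','n','e','x','t'] ['o','m','e','x'] = ['O','M','E','X'] ++ PySem.Chars.replace xs ['e','r','p','n','e','x','t'] ['o','m','e','x'] :=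
  pass_through ['e','r','p','n','e','x','t'] ['o','m','e','x'] ['O','M','E','X'] (by intro k hk xs; simp only [List.length_cons, List.length_nil] at hk; interval_cases k <;> (intro hpre; simp [List.cons_prefix_cons] at hpre)) xs

theorem passNW_v4 (xs : List Char) :
    PySem.Chars.replace (['O','M','E','X'] ++ xs) ['E','R','P','N','E','X','T'] ['O','M','E','X'] = ['O','M','E','X'] ++ PySem.Chars.replace xs ['E','R','P','N','E','X','T'] ['O','M','E','X'] :=
  pass_through ['E','R','P','N','E','X','T'] ['O','M','E','X'] ['O','M','E','X'] (by intro k hk xs; simp only [List.length_cons, List.length_nil] at hk; interval_cases k <;> (intro hpre; simp [List.cons_prefix_cons] at hpre)) xs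

theorem passnw_v4 (xs : List Char) :
    PySem.Chars.replace (['o','m','e','x'] ++ xs) ['E','R','P','N','E','X','T'] ['O','M','E','X'] = ['o','m','e','x'] ++ PySem.Chars.replace xs ['E','R','P','N','E','X','T'] ['O','M','E','X'] :=
  pass_through ['E','R','P','N','E','X','T'] ['O','M','E','X'] ['o','m','e','x'] (by intro k hk xs; simp only [List.length_cons, List.length_nil] at hk; interval_cases k <;> (intro hpre; simp [List.cons_prefix_cons] at hpre)) xs

theorem passV2_v1 (xs : List Char) :
    PySem.Chars.replace (['E','r','p','n','e','x','t'] ++ xs) ['E','R','P','N','e','x','t'] ['O','M','E','X'] = ['E','r','p','n','e','x','t'] ++ PySem.Chars.replace xs ['E','R','P','N','e','x','t'] ['O','M','E','X'] :=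
  pass_through ['E','R','P','N','e','x','t'] ['O','M','E','X'] ['E','r','p','n','e','x','t'] (by intro k hk xs; simp only [List.length_cons, List.length_nil] at hk; interval_cases k <;> (intro hpre; simp [List.cons_prefix_cons] at hpre)) xs

theorem passV3_v1 (xs : List Char) :
    PySem.Chars.replace (['e','r','p','n','e','x','t'] ++ xs) ['E','R','P','N','e','x','t'] ['O','M','E','X'] = ['e','r','p','n','e','x','t'] ++ PySem.Chars.replace xs ['E','R','P','N','e','x','t'] ['O','M','E','X'] :=
  pass_through ['E','R','P','N','e','x','t'] ['O','M','E','X'] ['e','r','p','n','e','x','t'] (by intro k hk xs; simp only [List.length_cons, List.length_nil] at hk; interval_cases k <;> (intro hpre; simp [List.cons_prefix_cons] at hpre)) xs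

theorem passV3_v2 (xs : List Char) :
    PySem.Chars.replace (['e','r','p','n','e','x','t'] ++ xs) ['E','r','p','n','e','x','t'] ['O','M','E','X'] = ['e','r','p','n','e','x','t'] ++ PySem.Chars.replace xs ['E','r','p','n','e','x','t'] ['O','M','E','X'] :=
  pass_through ['E','r','p','n','e','x','t'] ['O','M','E','X'] ['e','r','p','n','e','x','t'] (by intro k hk xs; simp only [List.length_cons, List.length_nil] at hk; interval_cases k <;> (intro hpre; simp [List.cons_prefix_cons] at hpre)) xs

theorem passV4_v1 (xs : List Char) :
    PySem.Chars.replace (['E','R','P','N','E','X','T'] ++ xs) ['E','R','P','N','e','x','t'] ['O','M','E','X'] = ['E','R','P','N','E','X','T'] ++ PySem.Chars.replace xs ['E','R','P','N','e','x','t'] ['O','M','E','X'] :=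
  pass_through ['E','R','P','N','e','x','t'] ['O','M','E','X'] ['E','R','P','N','E','X','T'] (by intro k hk xs; simp only [List.length_cons, List.length_nil] at hk; interval_cases k <;> (intro hpre; simp [List.cons_prefix_cons] at hpre)) xs

theorem passV4_v2 (xs : List Char) :
    PySem.Chars.replace (['E','R','P','N','E','X','T'] ++ xs) ['E','r','p','n','e','x','t'] ['O','M','E','X'] = ['E','R','P','N','E','X','T'] ++ PySem.Chars.replace xs ['E','r','p','n','e','x','t'] ['O','M','E','X'] :=
  pass_through ['E','r','p','n','e','x','t'] ['O','M','E','X'] ['E','R','P','N','E','X','T'] (by intro k hk xs; simp only [List.length_cons, List.length_nil] at hk; interval_cases k <;> (intro hpre; simp [List.cons_prefix_cons] at hpre)) xs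

theorem passV4_v3 (xs : List Char) :
    PySem.Chars.replace (['E','R','P','N','E','X','T'] ++ xs) ['e','r','p','n','e','x','t'] ['o','m','e','x'] = ['E','R','P','N','E','X','T'] ++ PySem.Chars.replace xs ['e','r','p','n','e','x','t'] ['o','m','e','x'] :=
  pass_through ['e','r','p','n','e','x','t'] ['o','m','e','x'] ['E','R','P','N','E','X','T'] (by intro k hk xs; simp only [List.length_cons, List.length_nil] at hk; interval_cases k <;> (intro hpre; simp [List.cons_prefix_cons] at hpre)) xs

def chainF (l : List Char) : List Char :=
  PySem.Chars.replace
    (PySem.Chars.replace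
      (PySem.Chars.replace
        (PySem.Chars.replace l ['E','R','P','N','e','x','t'] ['O','M','E','X'])
        ['E','r','p','n','e','x','t'] ['O','M','E','X'])
      ['e','r','p','n','e','x','t'] ['o','m','e','x'])
    ['E','R','P','N','E','X','T'] ['O','M','E','X']

theorem goAlt_nil : goAlt [] = [] := by simp [goAlt]

theorem goAlt_cons (c : Char) (t : List Char) :
    goAlt (c :: t) =
      (match brandPairs.lookup ((c :: t).take 7) with
       | some new => new ++ goAlt (t.drop 6)
       | none => c :: goAlt t) := by
  rw [goAlt]

theorem chain_nil : chainF [] = [] := by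
  unfold chainF
  rw [replace_nil _ _ (by decide), replace_nil _ _ (by decide),
      replace_nil _ _ (by decide), replace_nil _ _ (by decide)]

theorem hit1 (rest : List Char) : chainF (['E','R','P','N','e','x','t'] ++ rest) = ['O','M','E','X'] ++ chainF rest := by
  unfold chainF
  rw [replace_pos _ _ _ (by decide) (List.prefix_append _ _), List.drop_left,
      passNW_v2, passNW_v3, passNW_v4]

theorem hit2 (rest : List Char) : chainF (['E','r','p','n','e','x','t'] ++ rest) = ['O','M','E','X'] ++ chainF rest := by
  unfold chainF
  rw [passV2_v1,
      replace_pos _ _ _ (by decide) (List.prefix_append _ _), List.drop_left,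
      passNW_v3, passNW_v4]

theorem hit3 (rest : List Char) : chainF (['e','r','p','n','e','x','t'] ++ rest) = ['o','m','e','x'] ++ chainF rest := by
  unfold chainF
  rw [passV3_v1, passV3_v2,
      replace_pos _ _ _ (by decide) (List.prefix_append _ _), List.drop_left,
      passnw_v4]

theorem hit4 (rest : List Char) : chainF (['E','R','P','N','E','X','T'] ++ rest) = ['O','M','E','X'] ++ chainF rest := by
  unfold chainF
  rw [passV4_v1, passV4_v2, passV4_v3,
      replace_pos _ _ _ (by decide) (List.prefix_append _ _), List.drop_left]

theorem goAltHit1 (rest : List Char) : goAlt (['E','R','P','N','e','x','t'] ++ rest) = ['O','M','E','X'] ++ goAlt rest := by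
  have h := goAlt_cons 'E' (['R','P','N','e','x','t'] ++ rest)
  rw [show ('E' :: (['R','P','N','e','x','t'] ++ rest)) = ['E','R','P','N','e','x','t'] ++ rest from rfl] at h
  rw [List.take_left' (l₁ := ['E','R','P','N','e','x','t']) (i := 7) rfl] at h
  rw [show brandPairs.lookup ['E','R','P','N','e','x','t'] = some ['O','M','E','X'] from by decide] at h
  rw [List.drop_left' (l₁ := ['R','P','N','e','x','t']) (i := 6) rfl] at h
  exact h

theorem goAltHit2 (rest : List Char) : goAlt (['E','r','p','n','e','x','t'] ++ rest) = ['O','M','E','X'] ++ goAlt rest := by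
  have h := goAlt_cons 'E' (['r','p','n','e','x','t'] ++ rest)
  rw [show ('E' :: (['r','p','n','e','x','t'] ++ rest)) = ['E','r','p','n','e','x','t'] ++ rest from rfl] at h
  rw [List.take_left' (l₁ := ['E','r','p','n','e','x','t']) (i := 7) rfl] at h
  rw [show brandPairs.lookup ['E','r','p','n','e','x','t'] = some ['O','M','E','X'] from by decide] at h
  rw [List.drop_left' (l₁ := ['r','p','n','e','x','t']) (i := 6) rfl] at h
  exact h

theorem goAltHit3 (rest : List Char) : goAlt (['e','r','p','n','e','x','t'] ++ rest) = ['o','m','e','x'] ++ goAlt rest := by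
  have h := goAlt_cons 'e' (['r','p','n','e','x','t'] ++ rest)
  rw [show ('e' :: (['r','p','n','e','x','t'] ++ rest)) = ['e','r','p','n','e','x','t'] ++ rest from rfl] at h
  rw [List.take_left' (l₁ := ['e','r','p','n','e','x','t']) (i := 7) rfl] at h
  rw [show brandPairs.lookup ['e','r','p','n','e','x','t'] = some ['o','m','e','x'] from by decide] at h
  rw [List.drop_left' (l₁ := ['r','p','n','e','x','t']) (i := 6) rfl] at h
  exact h

theorem goAltHit4 (rest : List Char) : goAlt (['E','R','P','N','E','X','T'] ++ rest) = ['O','M','E','X'] ++ goAlt rest := by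
  have h := goAlt_cons 'E' (['R','P','N','E','X','T'] ++ rest)
  rw [show ('E' :: (['R','P','N','E','X','T'] ++ rest)) = ['E','R','P','N','E','X','T'] ++ rest from rfl] at h
  rw [List.take_left' (l₁ := ['E','R','P','N','E','X','T']) (i := 7) rfl] at h
  rw [show brandPairs.lookup ['E','R','P','N','E','X','T'] = some ['O','M','E','X'] from by decide] at h
  rw [List.drop_left' (l₁ := ['R','P','N','E','X','T']) (i := 6) rfl] at h
  exact h

theorem main_lemma : ∀ l : List Char, chainF l = goAlt l := by
  suffices H : ∀ (n : Nat) (l : List Char), l.length = n → chainF l = goAlt l from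
    fun l => H l.length l rfl
  intro n
  induction n using Nat.strong_induction_on with
  | _ n ih =>
    intro l hn
    cases l with
    | nil => rw [chain_nil, goAlt_nil]
    | cons c t =>
      by_cases h1 : ['E','R','P','N','e','x','t'] <+: (c :: t)
      · obtain ⟨rest, hrest⟩ := h1
        rw [← hrest, hit1, goAltHit1, ih rest.length (by subst hn; simp [← hrest]; omega) rest rfl]
      by_cases h2 : ['E','r','p','n','e','x','t'] <+: (c :: t)
      · obtain ⟨rest, hrest⟩ := h2
        rw [← hrest, hit2, goAltHit2, ih rest.length (by subst hn; simp [← hrest]; omega) rest rfl]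
      by_cases h3 : ['e','r','p','n','e','x','t'] <+: (c :: t)
      · obtain ⟨rest, hrest⟩ := h3
        rw [← hrest, hit3, goAltHit3, ih rest.length (by subst hn; simp [← hrest]; omega) rest rfl]
      by_cases h4 : ['E','R','P','N','E','X','T'] <+: (c :: t)
      · obtain ⟨rest, hrest⟩ := h4
        rw [← hrest, hit4, goAltHit4, ih rest.length (by subst hn; simp [← hrest]; omega) rest rfl]
      -- no variant starts here: every pass copies the head character
      have k1 : ((c :: t).take 7 == ['E','R','P','N','e','x','t']) = false := by
        apply beq_eq_false_iff_ne.mpr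
        intro he
        exact h1 (List.prefix_iff_eq_take.mpr he.symm)
      have k2 : ((c :: t).take 7 == ['E','r','p','n','e','x','t']) = false := by
        apply beq_eq_false_iff_ne.mpr
        intro he
        exact h2 (List.prefix_iff_eq_take.mpr he.symm)
      have k3 : ((c :: t).take 7 == ['e','r','p','n','e','x','t']) = false := by
        apply beq_eq_false_iff_ne.mpr
        intro he
        exact h3 (List.prefix_iff_eq_take.mpr he.symm)
      have k4 : ((c :: t).take 7 == ['E','R','P','N','E','X','T']) = false := by
        apply beq_eq_false_iff_ne.mpr
        intro he
        exact h4 (List.prefix_iff_eq_take.mpr he.symm)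
      have hm : brandPairs.lookup ((c :: t).take 7) = none := by
        simp only [brandPairs, List.lookup, k1, k2, k3, k4]
      have h2' : ¬ ['E','r','p','n','e','x','t'] <+: c :: PySem.Chars.replace t ['E','R','P','N','e','x','t'] ['O','M','E','X'] := by
        intro hp
        obtain ⟨hc, hs⟩ := List.cons_prefix_cons.mp hp
        have := prefix_reflect ['E','R','P','N','e','x','t'] ['O','M','E','X'] (List.cons_ne_nil _ _) 'O' ['M','E','X'] rfl
          ['r','p','n','e','x','t'] (by intro cc hcc; fin_cases hcc <;> decide) t hs
        exact h2 (List.cons_prefix_cons.mpr ⟨hc, this⟩)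
      have h3' : ¬ ['e','r','p','n','e','x','t'] <+: c :: PySem.Chars.replace (PySem.Chars.replace t ['E','R','P','N','e','x','t'] ['O','M','E','X']) ['E','r','p','n','e','x','t'] ['O','M','E','X'] := by
        intro hp
        obtain ⟨hc, hs⟩ := List.cons_prefix_cons.mp hp
        have hs1 := prefix_reflect ['E','r','p','n','e','x','t'] ['O','M','E','X'] (List.cons_ne_nil _ _) 'O' ['M','E','X'] rfl
          ['r','p','n','e','x','t'] (by intro cc hcc; fin_cases hcc <;> decide) _ hs
        have hs2 := prefix_reflect ['E','R','P','N','e','x','t'] ['O','M','E','X'] (List.cons_ne_nil _ _) 'O' ['M','E','X'] rfl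
          ['r','p','n','e','x','t'] (by intro cc hcc; fin_cases hcc <;> decide) t hs1
        exact h3 (List.cons_prefix_cons.mpr ⟨hc, hs2⟩)
      have h4' : ¬ ['E','R','P','N','E','X','T'] <+: c :: PySem.Chars.replace (PySem.Chars.replace (PySem.Chars.replace t ['E','R','P','N','e','x','t'] ['O','M','E','X']) ['E','r','p','n','e','x','t'] ['O','M','E','X']) ['e','r','p','n','e','x','t'] ['o','m','e','x'] := by
        intro hp
        obtain ⟨hc, hs⟩ := List.cons_prefix_cons.mp hp
        have hs1 := prefix_reflect ['e','r','p','n','e','x','t'] ['o','m','e','x'] (List.cons_ne_nil _ _) 'o' ['m','e','x'] rfl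
          ['R','P','N','E','X','T'] (by intro cc hcc; fin_cases hcc <;> decide) _ hs
        have hs2 := prefix_reflect ['E','r','p','n','e','x','t'] ['O','M','E','X'] (List.cons_ne_nil _ _) 'O' ['M','E','X'] rfl
          ['R','P','N','E','X','T'] (by intro cc hcc; fin_cases hcc <;> decide) _ hs1
        have hs3 := prefix_reflect ['E','R','P','N','e','x','t'] ['O','M','E','X'] (List.cons_ne_nil _ _) 'O' ['M','E','X'] rfl
          ['R','P','N','E','X','T'] (by intro cc hcc; fin_cases hcc <;> decide) t hs2
        exact h4 (List.cons_prefix_cons.mpr ⟨hc, hs3⟩)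
      rw [goAlt_cons, hm]
      unfold chainF
      rw [replace_neg _ _ _ _ h1, replace_neg _ _ _ _ h2', replace_neg _ _ _ _ h3',
          replace_neg _ _ _ _ h4']
      have := ih t.length (by simp [← hn]) t rfl
      unfold chainF at this
      rw [this]

-- ===== VERDICT (by name: the statement is the Claim_ definition above) =====
theorem replace_branding_spec : Claim_equal_replace_branding := by
  intro text _
  unfold Spec_replace_branding replace_branding replace_branding_alt
  apply String.toList_inj.mp
  simp only [List.foldl, PySem.Str.toList_replace, String.toList_ofList]
  rw [show "ERPNext".toList = ['E','R','P','N','e','x','t'] from rfl,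
      show "Erpnext".toList = ['E','r','p','n','e','x','t'] from rfl,
      show "erpnext".toList = ['e','r','p','n','e','x','t'] from rfl,
      show "ERPNEXT".toList = ['E','R','P','N','E','X','T'] from rfl,
      show "OMEX".toList = ['O','M','E','X'] from rfl,
      show "omex".toList = ['o','m','e','x'] from rfl]
  exact main_lemma text.toList
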